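-- pv_equiv track=rewrite | github.com/salloju000/Loan_Prediction_Ssytem | backend/loan_predictor.py | _cs_label
-- ===== SOURCE A (Python) =====
-- def _cs_label(cs: int) -> str:
--     thresholds = [
--         (800, "Exceptional"),
--         (750, "Very Good"),
--         (700, "Good"),
--         (650, "Fair"),
--         (600, "Poor"),
--     ]
--     for threshold, label in thresholds:
--         if cs >= threshold:
--             return label
--     return "Very Poor"
-- ===== SOURCE B (Python) =====
-- import bisect
--
-- _BOUNDARIES = [600, 650, 700, 750, 800]
-- _LABELS = ["Very Poor", "Poor", "Fair", "Good", "Very Good", "Exceptional"]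
--
-- def _cs_label(cs: int) -> str:
--     return _LABELS[bisect.bisect_right(_BOUNDARIES, cs)]
-- ===== Notes on version B (the rewrite author's own statement) =====
-- stated objective: idiomatic
-- what changed: Replaced the descending first-match threshold scan with a table lookup indexed by bisect_right over ascending boundaries.
import Mathlib
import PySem

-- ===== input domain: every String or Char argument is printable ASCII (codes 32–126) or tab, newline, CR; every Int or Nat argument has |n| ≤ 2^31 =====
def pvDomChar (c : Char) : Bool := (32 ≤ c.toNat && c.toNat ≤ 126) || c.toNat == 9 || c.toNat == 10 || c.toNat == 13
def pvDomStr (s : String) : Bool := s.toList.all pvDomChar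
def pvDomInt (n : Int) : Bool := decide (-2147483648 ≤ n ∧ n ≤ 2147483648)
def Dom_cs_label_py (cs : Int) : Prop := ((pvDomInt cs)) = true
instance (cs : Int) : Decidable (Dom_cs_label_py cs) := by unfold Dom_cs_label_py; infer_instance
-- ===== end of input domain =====

-- ===== PORT A =====
-- B replaces the descending threshold scan with a bisect-style table lookup (idiomatic).
def csThresholds : List (Int × String) :=
  [(800, "Exceptional"), (750, "Very Good"), (700, "Good"), (650, "Fair"), (600, "Poor")]

def csScan (cs : Int) : List (Int × String) → String
  | [] => "Very Poor"
  | (t, l) :: rest => if cs ≥ t then l else csScan cs rest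

def cs_label_py (cs : Int) : String := csScan cs csThresholds

-- ===== PORT B =====
def csBoundaries : List Int := [600, 650, 700, 750, 800]
def csLabels : List String :=
  ["Very Poor", "Poor", "Fair", "Good", "Very Good", "Exceptional"]

-- bisect.bisect_right on a sorted list = number of elements ≤ cs
def cs_label_py_alt (cs : Int) : String :=
  csLabels.getD (csBoundaries.countP (fun b => decide (b ≤ cs))) ""

-- ===== PRECONDITION & SPEC =====
def Spec_cs_label_py (cs : Int) (out : String) : Prop := out = cs_label_py_alt cs
instance (cs : Int) (out : String) : Decidable (Spec_cs_label_py cs out) := by unfold Spec_cs_label_py; infer_instance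

-- ===== CLAIM (what is proved, stated in full; the proofs are below) =====
def Claim_equal_cs_label_py : Prop := ∀ (cs : Int), Dom_cs_label_py cs → Spec_cs_label_py cs (cs_label_py cs)

-- ===== LEMMAS AND PROOFS =====

-- ===== VERDICT (by name: the statement is the Claim_ definition above) =====
theorem cs_label_py_spec : Claim_equal_cs_label_py := by
  intro cs _
  unfold Spec_cs_label_py cs_label_py cs_label_py_alt csScan csThresholds csBoundaries csLabels
  simp only [List.countP, List.countP.go, Bool.cond_eq_ite, decide_eq_true_eq]
  split_ifs <;>
    first
      | omega
      | (simp_all [csScan]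
         all_goals (split_ifs <;> first | rfl | omega))
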